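-- pv_equiv track=rewrite | github.com/wilmurillo-ai/Design-Assistant | .skills/openclaw-skills/skills/ucsdzehualiu/cloud-product-compare/scripts/cloud_doc_scraper.py | denoise_text
-- ===== SOURCE A (Python) =====
-- NOISE_PATTERNS = [
--     "为什么选择阿里云", "什么是云计算", "全球基础设施", "法律声明",
--     "Cookies政策", "廉正举报", "安全举报", "联系我们", "加入我们",
--     "阿里巴巴集团", "淘宝网", "天猫", "速卖通",
--     "关注阿里云", "阿里云公众号", "随时随地运维管控",
--     "售前咨询", "售后在线", "我要建议", "我要投诉",
--     "登录阿里云", "管理云资源", "状态一览",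
--     "Protected by Tencent", "正在验证连接安全性",
--     "华为云App", "950808", "售前咨询热线",
--     "云商店咨询", "备案服务", "增值电信业务",
--     "黔ICP备", "苏B2-", "贵公网安备",
-- ]
--
-- def denoise_text(text: str) -> str:
--     lines = text.split("\n")
--     clean = []
--     for line in lines:
--         s = line.strip()
--         if not s:
--             clean.append(""); continue
--         if not any(p in s for p in NOISE_PATTERNS):
--             clean.append(s)
--     result, prev_empty = [], False
--     for line in clean:
--         if not line:
--             if not prev_empty: result.append("")
--             prev_empty = True
--         else:
--             result.append(line); prev_empty = False
--     return "\n".join(result)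
-- ===== SOURCE B (Python) =====
-- NOISE_PATTERNS = [
--     "为什么选择阿里云", "什么是云计算", "全球基础设施", "法律声明",
--     "Cookies政策", "廉正举报", "安全举报", "联系我们", "加入我们",
--     "阿里巴巴集团", "淘宝网", "天猫", "速卖通",
--     "关注阿里云", "阿里云公众号", "随时随地运维管控",
--     "售前咨询", "售后在线", "我要建议", "我要投诉",
--     "登录阿里云", "管理云资源", "状态一览",
--     "Protected by Tencent", "正在验证连接安全性",
--     "华为云App", "950808", "售前咨询热线",
--     "云商店咨询", "备案服务", "增值电信业务",
--     "黔ICP备", "苏B2-", "贵公网安备",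
-- ]
--
-- def denoise_text(text: str) -> str:
--     # Single fused pass: no intermediate clean list.
--     result, prev_empty = [], False
--     for line in text.split("\n"):
--         s = line.strip()
--         if not s:
--             if not prev_empty:
--                 result.append("")
--             prev_empty = True
--         elif not any(p in s for p in NOISE_PATTERNS):
--             result.append(s)
--             prev_empty = False
--         # noise lines are skipped without touching prev_empty
--     return "\n".join(result)
-- ===== Notes on version B (the rewrite author's own statement) =====
-- stated objective: simpler
-- what changed: Fuses A's two sequential passes (filter/strip pass building a clean list, then a blank-collapsing pass) into one loop that threads the prev_empty flag directly, eliminating the intermediate list.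
import Mathlib
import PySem

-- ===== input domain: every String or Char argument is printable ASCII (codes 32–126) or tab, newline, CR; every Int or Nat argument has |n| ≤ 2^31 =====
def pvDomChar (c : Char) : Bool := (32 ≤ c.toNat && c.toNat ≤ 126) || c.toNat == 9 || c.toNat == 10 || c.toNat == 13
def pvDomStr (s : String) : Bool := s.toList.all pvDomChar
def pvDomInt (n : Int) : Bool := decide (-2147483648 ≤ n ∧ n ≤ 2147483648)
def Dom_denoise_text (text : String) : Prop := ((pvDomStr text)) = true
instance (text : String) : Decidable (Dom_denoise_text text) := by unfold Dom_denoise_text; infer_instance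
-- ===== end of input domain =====

-- B fuses A's two passes (filter/strip, then blank collapsing) into one loop; objective: simpler.

-- module constant NOISE_PATTERNS (shared by both Pythons)
def pvNoisePatterns : List String := [
  "为什么选择阿里云", "什么是云计算", "全球基础设施", "法律声明",
  "Cookies政策", "廉正举报", "安全举报", "联系我们", "加入我们",
  "阿里巴巴集团", "淘宝网", "天猫", "速卖通",
  "关注阿里云", "阿里云公众号", "随时随地运维管控",
  "售前咨询", "售后在线", "我要建议", "我要投诉",
  "登录阿里云", "管理云资源", "状态一览",
  "Protected by Tencent", "正在验证连接安全性",
  "华为云App", "950808", "售前咨询热线",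
  "云商店咨询", "备案服务", "增值电信业务",
  "黔ICP备", "苏B2-", "贵公网安备"]

-- ===== PORT A =====
-- first pass: strip, drop noise lines, keep "" for blank lines
def pvCleanStep (acc : List String) (line : String) : List String :=
  let s := PySem.Str.strip line
  if s = "" then acc ++ [""]
  else if pvNoisePatterns.any (fun p => PySem.Str.isIn p s) then acc
  else acc ++ [s]

-- second pass: collapse runs of blank lines (state = (result, prev_empty))
def pvCollapseStep (st : List String × Bool) (line : String) : List String × Bool :=
  if line = "" then (if st.2 then st.1 else st.1 ++ [""], true)
  else (st.1 ++ [line], false)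

def denoise_text (text : String) : String :=
  let lines := (PySem.Str.split? text "\n").getD []
  let clean := lines.foldl pvCleanStep []
  let st := clean.foldl pvCollapseStep ([], false)
  PySem.Str.join "\n" st.1

-- ===== PORT B =====
-- single fused pass: strip, skip noise without touching prev_empty, collapse blanks
def pvFuseStep (st : List String × Bool) (line : String) : List String × Bool :=
  let s := PySem.Str.strip line
  if s = "" then (if st.2 then st.1 else st.1 ++ [""], true)
  else if pvNoisePatterns.any (fun p => PySem.Str.isIn p s) then st
  else (st.1 ++ [s], false)

def denoise_text_alt (text : String) : String :=
  let lines := (PySem.Str.split? text "\n").getD []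
  let st := lines.foldl pvFuseStep ([], false)
  PySem.Str.join "\n" st.1

-- ===== PRECONDITION & SPEC =====
def Spec_denoise_text (text : String) (out : String) : Prop := out = denoise_text_alt text
instance (text : String) (out : String) : Decidable (Spec_denoise_text text out) := by unfold Spec_denoise_text; infer_instance

-- ===== CLAIM (what is proved, stated in full; the proofs are below) =====
def Claim_equal_denoise_text : Prop := ∀ (text : String), Dom_denoise_text text → Spec_denoise_text text (denoise_text text)

-- ===== LEMMAS AND PROOFS =====

-- what one line contributes to A's clean list
def pvCleanOne (line : String) : List String :=
  let s := PySem.Str.strip line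
  if s = "" then [""]
  else if pvNoisePatterns.any (fun p => PySem.Str.isIn p s) then []
  else [s]

theorem pvCleanStep_eq (acc : List String) (line : String) :
    pvCleanStep acc line = acc ++ pvCleanOne line := by
  simp only [pvCleanStep, pvCleanOne]
  split_ifs <;> simp

theorem clean_eq_flatMap (lines : List String) (acc : List String) :
    lines.foldl pvCleanStep acc = acc ++ lines.flatMap pvCleanOne := by
  have : lines.foldl pvCleanStep acc
      = lines.foldl (fun a l => a ++ pvCleanOne l) acc := by
    induction lines generalizing acc with
    | nil => rfl
    | cons l ls ih => simp [List.foldl, pvCleanStep_eq, ih]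
  rw [this, PySem.List.foldl_append_eq_flatMap]

-- collapsing one line's clean contribution is exactly the fused step
theorem collapse_cleanOne (st : List String × Bool) (line : String) :
    (pvCleanOne line).foldl pvCollapseStep st = pvFuseStep st line := by
  simp only [pvCleanOne, pvFuseStep]
  split_ifs with h1 h2 h3
  · simp [pvCollapseStep, h2]
  · simp [pvCollapseStep, h2]
  · rfl
  · simp [pvCollapseStep, h1]

theorem collapse_flatMap (lines : List String) (st : List String × Bool) :
    (lines.flatMap pvCleanOne).foldl pvCollapseStep st = lines.foldl pvFuseStep st := by
  induction lines generalizing st with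
  | nil => rfl
  | cons l ls ih =>
    simp only [List.flatMap_cons, List.foldl_append, List.foldl]
    rw [collapse_cleanOne, ih]

-- ===== VERDICT (by name: the statement is the Claim_ definition above) =====
theorem denoise_text_spec : Claim_equal_denoise_text := by
  intro text _
  simp only [Spec_denoise_text, denoise_text, denoise_text_alt]
  rw [clean_eq_flatMap, List.nil_append, collapse_flatMap]
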